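-- pv_equiv track=rewrite | github.com/davehenton/skolagatt | common/models.py | _lesskilnings_results
-- ===== SOURCE A (Python) =====
-- def _lesskilnings_results(input_values):
--     '''
--     Skilum niðurstöðum prófs í lesskilningi
--     '''
--     # Cycle through input_values, sum up all values where the key starts with
--     # 'hljod_', 'mal_', 'bok_'. Checks for input errors.
--     lesskilnings_sums = {'hljod_': 0, 'mal_': 0, 'bok_': 0}
--     for key, value in input_values.items():
--         for type_sum in lesskilnings_sums.keys():
--             # type = 'hljod_' for instance, type_sum for 'hljod_' starts as 0
--             if key.startswith(type_sum):
--                 if not str(value).isdigit():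
--                     # Input error so we will make this type_sum permanently = -1 to indicate error
--                     lesskilnings_sums[type_sum] = -1
--                 elif str(value).isdigit() and not lesskilnings_sums[type_sum] == -1:
--                     # Not input error so let's add up
--                     lesskilnings_sums[type_sum] += int(value)
--
--     hopar = []
--     if lesskilnings_sums["hljod_"] == -1:
--         hopar.append('Vantar gögn')
--     elif lesskilnings_sums["hljod_"] <= 14:
--         hopar.append('Áhætta 1')
--     elif lesskilnings_sums["hljod_"] <= 17:
--         hopar.append('Áhætta 2')
--     elif lesskilnings_sums["hljod_"] <= 19:
--         hopar.append('Óvissa')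
--     else:
--         hopar.append('Utan áhættu')
--
--     if lesskilnings_sums["mal_"] == -1:
--         hopar.append('Vantar gögn')
--     elif lesskilnings_sums["mal_"] <= 14:
--         hopar.append('Áhætta 1')
--     elif lesskilnings_sums["mal_"] <= 16:
--         hopar.append('Áhætta 2')
--     elif lesskilnings_sums["mal_"] <= 17:
--         hopar.append('Óvissa')
--     else:
--         hopar.append('Utan áhættu')
--
--     if lesskilnings_sums["bok_"] == -1:
--         hopar.append('Vantar gögn')
--     elif lesskilnings_sums["bok_"] <= 7:
--         hopar.append('Áhætta 1')
--     elif lesskilnings_sums["bok_"] <= 10: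
--         hopar.append('Áhætta 2')
--     elif lesskilnings_sums["bok_"] <= 12:
--         hopar.append('Óvissa')
--     else:
--         hopar.append('Utan áhættu')
--
--     return hopar
-- ===== SOURCE B (Python) =====
-- from bisect import bisect_left
--
-- _TABLE = [('hljod_', [14, 17, 19]), ('mal_', [14, 16, 17]), ('bok_', [7, 10, 12])]
-- _LABELS = ['Áhætta 1', 'Áhætta 2', 'Óvissa', 'Utan áhættu']
--
--
-- def _lesskilnings_results(input_values):
--     '''
--     Skilum niðurstöðum prófs í lesskilningi
--     '''
--     hopar = []
--     for prefix, cuts in _TABLE: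
--         vals = [str(v) for k, v in input_values.items() if k.startswith(prefix)]
--         if any(not v.isdigit() for v in vals):
--             hopar.append('Vantar gögn')
--         else:
--             hopar.append(_LABELS[bisect_left(cuts, sum(int(v) for v in vals))])
--     return hopar
-- ===== Notes on version B (the rewrite author's own statement) =====
-- stated objective: simpler
-- what changed: B replaces A's per-item inner loop over the sums dict and its three duplicated elif-ladders by one pass per prefix (filter the matching values, any() for the error case, sum() otherwise) and a shared table of thresholds classified with bisect.bisect_left into a single label list.
import Mathlib
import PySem

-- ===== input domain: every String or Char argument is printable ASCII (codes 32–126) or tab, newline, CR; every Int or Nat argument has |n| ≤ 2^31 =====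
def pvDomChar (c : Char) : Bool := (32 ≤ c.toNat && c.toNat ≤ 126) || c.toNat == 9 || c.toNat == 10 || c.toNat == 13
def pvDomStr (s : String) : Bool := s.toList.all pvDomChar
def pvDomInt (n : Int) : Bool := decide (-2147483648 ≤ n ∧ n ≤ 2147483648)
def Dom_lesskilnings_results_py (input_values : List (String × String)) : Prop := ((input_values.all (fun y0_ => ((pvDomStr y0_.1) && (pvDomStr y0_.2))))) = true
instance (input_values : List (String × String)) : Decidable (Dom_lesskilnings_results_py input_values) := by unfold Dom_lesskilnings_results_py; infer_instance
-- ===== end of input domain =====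

-- B replaces A's three duplicated elif-ladders and the per-item inner prefix loop by one pass per prefix
-- (filter + any/sum) and a table-driven bisect over the thresholds; objective: simpler.

-- ===== PORT A =====
-- literal transliteration of _lesskilnings_results; dict → PySem.Dict;
-- lesskilnings_sums[type_sum] (key always present) totalised as .getD type_sum 0;
-- int(value) (guarded by isdigit) totalised as (PySem.Int.ofStr? value).getD 0; str(value) = value (already a str).
def lesskilnings_results_py (input_values : List (String × String)) : List String :=
  let sums0 : PySem.Dict String Int :=
    ((PySem.Dict.empty.insert "hljod_" 0).insert "mal_" 0).insert "bok_" 0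
  let sums := input_values.foldl (fun sums kv =>
    sums.keys.foldl (fun s type_sum =>
      if PySem.Str.startswith kv.1 type_sum = true then
        if ¬ (PySem.Str.strIsdigit kv.2 = true) then s.insert type_sum (-1)
        else if PySem.Str.strIsdigit kv.2 = true ∧ ¬ (s.getD type_sum 0 = -1) then
          s.insert type_sum (s.getD type_sum 0 + (PySem.Int.ofStr? kv.2).getD 0)
        else s
      else s) sums) sums0
  let hopar : List String := []
  let hopar := hopar ++ [if sums.getD "hljod_" 0 = -1 then "Vantar gögn"
    else if sums.getD "hljod_" 0 ≤ 14 then "Áhætta 1"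
    else if sums.getD "hljod_" 0 ≤ 17 then "Áhætta 2"
    else if sums.getD "hljod_" 0 ≤ 19 then "Óvissa" else "Utan áhættu"]
  let hopar := hopar ++ [if sums.getD "mal_" 0 = -1 then "Vantar gögn"
    else if sums.getD "mal_" 0 ≤ 14 then "Áhætta 1"
    else if sums.getD "mal_" 0 ≤ 16 then "Áhætta 2"
    else if sums.getD "mal_" 0 ≤ 17 then "Óvissa" else "Utan áhættu"]
  let hopar := hopar ++ [if sums.getD "bok_" 0 = -1 then "Vantar gögn"
    else if sums.getD "bok_" 0 ≤ 7 then "Áhætta 1"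
    else if sums.getD "bok_" 0 ≤ 10 then "Áhætta 2"
    else if sums.getD "bok_" 0 ≤ 12 then "Óvissa" else "Utan áhættu"]
  hopar

-- ===== PORT B =====
-- literal transliteration of Source B: module constants _TABLE/_LABELS, per-prefix filter + any/sum + bisect_left;
-- str(v) = v (values are str); _LABELS[i] (always in range here) totalised as .getD i "".
def pvTable : List (String × List Int) :=
  [("hljod_", [14, 17, 19]), ("mal_", [14, 16, 17]), ("bok_", [7, 10, 12])]
def pvLabels : List String := ["Áhætta 1", "Áhætta 2", "Óvissa", "Utan áhættu"]

def lesskilnings_results_py_alt (input_values : List (String × String)) : List String :=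
  pvTable.foldl (fun hopar pc =>
    let vals := (input_values.filter (fun kv => PySem.Str.startswith kv.1 pc.1)).map (fun kv => kv.2)
    if vals.any (fun v => !(PySem.Str.strIsdigit v)) then hopar ++ ["Vantar gögn"]
    else hopar ++ [pvLabels.getD
      (PySem.List.bisectLeft pc.2 ((vals.map (fun v => (PySem.Int.ofStr? v).getD 0)).sum)) ""]) []

-- ===== PRECONDITION & SPEC =====
def Spec_lesskilnings_results_py (input_values : List (String × String)) (out : List String) : Prop := out = lesskilnings_results_py_alt input_values
instance (input_values : List (String × String)) (out : List String) : Decidable (Spec_lesskilnings_results_py input_values out) := by unfold Spec_lesskilnings_results_py; infer_instance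

-- ===== CLAIM (what is proved, stated in full; the proofs are below) =====
def Claim_equal_lesskilnings_results_py : Prop := ∀ (input_values : List (String × String)), Dom_lesskilnings_results_py input_values → Spec_lesskilnings_results_py input_values (lesskilnings_results_py input_values)

-- ===== LEMMAS AND PROOFS =====

-- abbreviations for the proofs (not used by the ports)
def pvToInt (v : String) : Int := (PySem.Int.ofStr? v).getD 0

def pvStep (acc : Int) (v : String) : Int :=
  if ¬ (PySem.Str.strIsdigit v = true) then -1
  else if acc = -1 then -1 else acc + pvToInt v

-- the per-item inner loop body of A, named for the proofs (definitionally the port's lambda)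
def pvBody (kv : String × String) (s : PySem.Dict String Int) (type_sum : String) : PySem.Dict String Int :=
  if PySem.Str.startswith kv.1 type_sum = true then
    if ¬ (PySem.Str.strIsdigit kv.2 = true) then s.insert type_sum (-1)
    else if PySem.Str.strIsdigit kv.2 = true ∧ ¬ (s.getD type_sum 0 = -1) then
      s.insert type_sum (s.getD type_sum 0 + (PySem.Int.ofStr? kv.2).getD 0)
    else s
  else s

-- int('<digits>') is a Nat cast, hence nonnegative (third/'+' branch of the parser)
theorem pv_opt_nonneg (o : Option Nat) :
    0 ≤ (Option.map (fun n : Int => n) (do let a ← o; pure ((a : Int)))).getD 0 := by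
  cases o <;> simp

theorem pv_digit_not_space {c : Char} (h : PySem.Chars.isdigit c = true) :
    PySem.Int.isIntSpace c = false := by
  simp only [PySem.Chars.isdigit, Bool.and_eq_true, decide_eq_true_eq] at h
  simp only [PySem.Int.isIntSpace, Bool.or_eq_false_iff, decide_eq_false_iff_not]
  refine ⟨⟨⟨⟨⟨?_, ?_⟩, ?_⟩, ?_⟩, ?_⟩, ?_⟩ <;> rintro rfl <;> exact absurd h.1 (by decide)

theorem pv_toInt_chars_nonneg (v : List Char) (h : PySem.Chars.strIsdigit v = true) :
    0 ≤ (PySem.Int.ofChars? v).getD 0 := by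
  simp only [PySem.Chars.strIsdigit, Bool.and_eq_true, Bool.not_eq_eq_eq_not, Bool.not_true,
    List.isEmpty_eq_false_iff, List.all_eq_true] at h
  obtain ⟨hne, hall⟩ := h
  have hdw : (List.dropWhile PySem.Int.isIntSpace v) = v := by
    cases v with
    | nil => simp
    | cons c t =>
      rw [List.dropWhile_cons_of_neg]
      simp [pv_digit_not_space (hall c (by simp))]
  have hdw2 : (List.dropWhile PySem.Int.isIntSpace v.reverse) = v.reverse := by
    cases hv : v.reverse with
    | nil => simp
    | cons c t =>
      rw [List.dropWhile_cons_of_neg]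
      have hm : c ∈ v := by
        have : c ∈ v.reverse := by rw [hv]; simp
        simpa using this
      simp [pv_digit_not_space (hall c hm)]
  unfold PySem.Int.ofChars?
  rw [hdw, hdw2, List.reverse_reverse]
  dsimp only
  cases v with
  | nil => simp at hne
  | cons c t =>
    have hc : PySem.Chars.isdigit c = true := hall c (by simp)
    have hcm : c ≠ '-' := by rintro rfl; simp [PySem.Chars.isdigit] at hc
    have hcp : c ≠ '+' := by rintro rfl; simp [PySem.Chars.isdigit] at hc
    split
    next ds heq => injection heq with h1 h2; exact absurd h1 hcm
    next ds heq => injection heq with h1 h2; exact absurd h1 hcp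
    next => exact pv_opt_nonneg _

theorem pv_toInt_nonneg (v : String) (h : PySem.Str.strIsdigit v = true) : 0 ≤ pvToInt v := by
  have := pv_toInt_chars_nonneg v.toList (by simpa [PySem.Str.strIsdigit] using h)
  simpa [pvToInt, PySem.Int.ofStr?] using this

-- A's inner loop over a Nodup key list updates each present key by pvStep exactly when it matches
theorem pv_inner (kv : String × String) (l : List String) :
    ∀ (d : PySem.Dict String Int), (∀ q ∈ l, d.contains q = true) → l.Nodup →
    (l.foldl (pvBody kv) d).keys = d.keys ∧
    ∀ p, (l.foldl (pvBody kv) d).getD p 0 =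
      if p ∈ l ∧ PySem.Str.startswith kv.1 p = true then pvStep (d.getD p 0) kv.2
      else d.getD p 0 := by
  induction l with
  | nil => intro d _ _; exact ⟨rfl, fun p => by simp⟩
  | cons q t ih =>
    intro d hc hnd
    have hq : d.contains q = true := hc q (by simp)
    have hkeys : (pvBody kv d q).keys = d.keys := by
      unfold pvBody
      split_ifs <;> simp [PySem.Dict.keys_insert_of_contains, hq]
    have hgq : (pvBody kv d q).getD q 0 =
        if PySem.Str.startswith kv.1 q = true then pvStep (d.getD q 0) kv.2
        else d.getD q 0 := by
      unfold pvBody pvStep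
      split_ifs with h1 h2 h3 <;>
        simp_all [PySem.Dict.getD_insert_self, pvToInt]
    have hgne : ∀ p, p ≠ q → (pvBody kv d q).getD p 0 = d.getD p 0 := by
      intro p hp
      unfold pvBody
      split_ifs <;> simp [PySem.Dict.getD_insert_of_ne, hp]
    have hcont : ∀ x, (pvBody kv d q).contains x = d.contains x := by
      intro x
      rw [PySem.Dict.contains_eq_decide_mem_keys, PySem.Dict.contains_eq_decide_mem_keys, hkeys]
    obtain ⟨ik, ig⟩ := ih (pvBody kv d q)
      (fun r hr => by rw [hcont]; exact hc r (by simp [hr]))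
      (List.nodup_cons.mp hnd).2
    refine ⟨ik.trans hkeys, ?_⟩
    intro p
    rw [List.foldl_cons, ig p]
    by_cases hpq : p = q
    · subst hpq
      have hpt : p ∉ t := (List.nodup_cons.mp hnd).1
      rw [if_neg (by simp [hpt]), hgq]
      by_cases hsw : PySem.Str.startswith kv.1 p = true
      · rw [if_pos hsw, if_pos ⟨by simp, hsw⟩]
      · rw [if_neg hsw, if_neg (fun hcc => hsw hcc.2)]
    · rw [hgne p hpq]
      by_cases hm : p ∈ t ∧ PySem.Str.startswith kv.1 p = true
      · rw [if_pos hm, if_pos ⟨by simp [hm.1], hm.2⟩]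
      · rw [if_neg hm, if_neg ?_]
        rintro ⟨hmem, hswt⟩
        exact hm ⟨(List.mem_cons.mp hmem).resolve_left hpq, hswt⟩

-- the outer fold: each of the three keys accumulates pvStep over its matching items
theorem pv_outer (l : List (String × String)) :
    ∀ (d : PySem.Dict String Int), d.keys = ["hljod_", "mal_", "bok_"] →
    (l.foldl (fun s kv => s.keys.foldl (pvBody kv) s) d).keys = ["hljod_", "mal_", "bok_"] ∧
    ∀ p ∈ (["hljod_", "mal_", "bok_"] : List String),
      (l.foldl (fun s kv => s.keys.foldl (pvBody kv) s) d).getD p 0 =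
        l.foldl (fun acc kv => if PySem.Str.startswith kv.1 p = true then pvStep acc kv.2 else acc)
          (d.getD p 0) := by
  induction l with
  | nil => intro d hk; exact ⟨hk, fun p _ => rfl⟩
  | cons kv t ih =>
    intro d hk
    obtain ⟨ik, ig⟩ := pv_inner kv d.keys d
      (fun q hq => by rw [PySem.Dict.contains_eq_decide_mem_keys]; simpa using hq)
      (by rw [hk]; decide)
    obtain ⟨ok, og⟩ := ih (d.keys.foldl (pvBody kv) d) (ik.trans hk)
    refine ⟨ok, ?_⟩
    intro p hp
    have hpk : p ∈ d.keys := by rw [hk]; exact hp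
    rw [List.foldl_cons, List.foldl_cons, og p hp, ig p]
    by_cases hsw : PySem.Str.startswith kv.1 p = true
    · rw [if_pos ⟨hpk, hsw⟩, if_pos hsw]
    · rw [if_neg (fun hcc => hsw hcc.2), if_neg hsw]

-- conditional fold = fold over the filtered values (B's traversal)
theorem pv_fold_filter (p : String) (l : List (String × String)) (a : Int) :
    l.foldl (fun acc kv => if PySem.Str.startswith kv.1 p = true then pvStep acc kv.2 else acc) a
      = ((l.filter (fun kv => PySem.Str.startswith kv.1 p)).map (fun kv => kv.2)).foldl pvStep a := by
  induction l generalizing a with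
  | nil => rfl
  | cons kv t ih =>
    by_cases h : PySem.Str.startswith kv.1 p = true <;> simp [h, ih, -PySem.Str.startswith_eq]

theorem pv_foldl_step_neg (vs : List String) : vs.foldl pvStep (-1) = -1 := by
  induction vs with
  | nil => rfl
  | cons v t ih =>
    have hs : pvStep (-1) v = -1 := by
      unfold pvStep
      split_ifs <;> simp_all
    simp [hs, ih]

-- sentinel characterisation of A's accumulator
theorem pv_foldl_step (vs : List String) :
    ∀ a : Int, 0 ≤ a →
    vs.foldl pvStep a =
      if vs.any (fun v => !(PySem.Str.strIsdigit v)) then -1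
      else a + (vs.map pvToInt).sum := by
  induction vs with
  | nil => intro a _; simp
  | cons v t ih =>
    intro a ha
    by_cases h : PySem.Str.strIsdigit v = true
    · have hs : pvStep a v = a + pvToInt v := by
        unfold pvStep
        rw [if_neg (not_not_intro h), if_neg (by omega)]
      have hnn : 0 ≤ a + pvToInt v := by have := pv_toInt_nonneg v h; omega
      simp only [List.foldl_cons, hs, List.any_cons, h, Bool.not_true, Bool.false_or,
        List.map_cons, List.sum_cons, ih _ hnn]
      split <;> [rfl; omega]
    · have hs : pvStep a v = -1 := by unfold pvStep; rw [if_pos h]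
      have hv : PySem.Str.strIsdigit v = false := by simpa using h
      rw [List.foldl_cons, hs, pv_foldl_step_neg, if_pos]
      simp only [List.any_cons, Bool.or_eq_true, Bool.not_eq_true']
      exact Or.inl (by simpa [PySem.Str.strIsdigit] using hv)

-- uniqueness direction of bisectLeft_spec
theorem pv_bl_unique (xs : List Int) (x : Int) (hp : List.Pairwise (· ≤ ·) xs) (k : Nat)
    (hk : k ≤ xs.length)
    (hlt : ∀ j (hj : j < xs.length), j < k → xs[j] < x)
    (hge : ∀ j (hj : j < xs.length), k ≤ j → x ≤ xs[j]) :
    PySem.List.bisectLeft xs x = k := by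
  obtain ⟨hle, h1, h2⟩ := PySem.List.bisectLeft_spec xs x hp
  set b := PySem.List.bisectLeft xs x with hb
  rcases lt_trichotomy b k with h|h|h
  · have t1 := hlt b (lt_of_lt_of_le h hk) h
    have t2 := h2 b (lt_of_lt_of_le h hk) le_rfl
    omega
  · exact h
  · have t1 := h1 k (lt_of_lt_of_le h hle) h
    have t2 := hge k (lt_of_lt_of_le h hle) le_rfl
    omega

theorem pv_bl (c1 c2 c3 : Int) (h12 : c1 ≤ c2) (h23 : c2 ≤ c3) (s : Int) :
    PySem.List.bisectLeft [c1, c2, c3] s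
      = (if s ≤ c1 then 0 else if s ≤ c2 then 1 else if s ≤ c3 then 2 else 3) := by
  apply pv_bl_unique _ _ (by simp [h12, h23, le_trans h12 h23])
  · split_ifs <;> simp
  · split_ifs <;> (intro j hj hjk; simp at hj; interval_cases j <;> simp <;> omega)
  · split_ifs <;> (intro j hj hjk; simp at hj; interval_cases j <;> simp <;> omega)

-- A's elif-ladder equals B's label lookup, for any nonnegative sum
theorem pv_ladder (c1 c2 c3 : Int) (h12 : c1 ≤ c2) (h23 : c2 ≤ c3) (s : Int) (hs : 0 ≤ s) :
    (if s = -1 then "Vantar gögn"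
     else if s ≤ c1 then "Áhætta 1"
     else if s ≤ c2 then "Áhætta 2"
     else if s ≤ c3 then "Óvissa" else "Utan áhættu")
      = pvLabels.getD (PySem.List.bisectLeft [c1, c2, c3] s) "" := by
  rw [pv_bl c1 c2 c3 h12 h23 s]
  have : ¬ (s = -1) := by omega
  simp only [this, if_false]
  split_ifs <;> rfl

-- named pieces of the two ports (definitional repackagings, proved by rfl)
def pvSums (l : List (String × String)) : PySem.Dict String Int :=
  l.foldl (fun s kv => s.keys.foldl (pvBody kv) s)
    (((PySem.Dict.empty.insert "hljod_" 0).insert "mal_" 0).insert "bok_" 0)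

def pvClassify (s c1 c2 c3 : Int) : String :=
  if s = -1 then "Vantar gögn"
  else if s ≤ c1 then "Áhætta 1"
  else if s ≤ c2 then "Áhætta 2"
  else if s ≤ c3 then "Óvissa" else "Utan áhættu"

def pvB (l : List (String × String)) (p : String) (cuts : List Int) : String :=
  let vals := (l.filter (fun kv => PySem.Str.startswith kv.1 p)).map (fun kv => kv.2)
  if vals.any (fun v => !(PySem.Str.strIsdigit v)) then "Vantar gögn"
  else pvLabels.getD
    (PySem.List.bisectLeft cuts ((vals.map (fun v => (PySem.Int.ofStr? v).getD 0)).sum)) ""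

theorem pv_portA (l : List (String × String)) :
    lesskilnings_results_py l =
      [pvClassify ((pvSums l).getD "hljod_" 0) 14 17 19,
       pvClassify ((pvSums l).getD "mal_" 0) 14 16 17,
       pvClassify ((pvSums l).getD "bok_" 0) 7 10 12] := rfl

theorem pv_portB (l : List (String × String)) :
    lesskilnings_results_py_alt l =
      [pvB l "hljod_" [14, 17, 19], pvB l "mal_" [14, 16, 17], pvB l "bok_" [7, 10, 12]] := by
  simp only [lesskilnings_results_py_alt, pvTable, pvB, List.foldl_cons, List.foldl_nil]
  split_ifs <;> rfl

-- one component: A's summed-and-classified value equals B's filter/any/sum/bisect value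
theorem pv_comp (l : List (String × String)) (p : String)
    (hp : p ∈ (["hljod_", "mal_", "bok_"] : List String)) (c1 c2 c3 : Int)
    (h12 : c1 ≤ c2) (h23 : c2 ≤ c3) :
    pvClassify ((pvSums l).getD p 0) c1 c2 c3 = pvB l p [c1, c2, c3] := by
  obtain ⟨_, g⟩ := pv_outer l
    (((PySem.Dict.empty.insert "hljod_" 0).insert "mal_" 0).insert "bok_" 0) (by decide)
  have hz : ((((PySem.Dict.empty.insert "hljod_" (0:Int)).insert "mal_" 0).insert "bok_" 0)).getD p 0 = 0 := by
    fin_cases hp <;> decide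
  have hv : (pvSums l).getD p 0 =
      ((l.filter (fun kv => PySem.Str.startswith kv.1 p)).map (fun kv => kv.2)).foldl pvStep 0 := by
    unfold pvSums
    rw [g p hp, hz, pv_fold_filter]
  set vs := (l.filter (fun kv => PySem.Str.startswith kv.1 p)).map (fun kv => kv.2) with hvs
  rw [pv_foldl_step vs 0 le_rfl] at hv
  by_cases he : vs.any (fun v => !(PySem.Str.strIsdigit v)) = true
  · rw [if_pos he] at hv
    unfold pvB pvClassify
    rw [← hvs, if_pos he, hv, if_pos rfl]
  · rw [if_neg he, zero_add] at hv
    have hdig : ∀ v ∈ vs, PySem.Str.strIsdigit v = true := by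
      intro v hvm
      by_contra hno
      exact he (List.any_eq_true.mpr ⟨v, hvm, by simp [Bool.not_eq_true] at hno ⊢; exact hno⟩)
    have hnn : 0 ≤ (vs.map pvToInt).sum := by
      apply List.sum_nonneg
      intro x hx
      simp only [List.mem_map] at hx
      obtain ⟨v, hvmem, rfl⟩ := hx
      exact pv_toInt_nonneg v (hdig v hvmem)
    have hmapeq : vs.map (fun v => (PySem.Int.ofStr? v).getD 0) = vs.map pvToInt := rfl
    unfold pvB pvClassify
    rw [← hvs, if_neg he, hv, hmapeq]
    exact pv_ladder c1 c2 c3 h12 h23 ((vs.map pvToInt).sum) hnn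

-- ===== VERDICT (by name: the statement is the Claim_ definition above) =====
theorem lesskilnings_results_py_spec : Claim_equal_lesskilnings_results_py := by
  intro l _
  unfold Spec_lesskilnings_results_py
  rw [pv_portA, pv_portB,
    pv_comp l "hljod_" (by decide) 14 17 19 (by norm_num) (by norm_num),
    pv_comp l "mal_" (by decide) 14 16 17 (by norm_num) (by norm_num),
    pv_comp l "bok_" (by decide) 7 10 12 (by norm_num) (by norm_num)]
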